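-- pv_equiv track=rewrite | github.com/nchan2016/SCA | lib_analysis/vul_get.py | parse_Uri
-- ===== SOURCE A (Python) =====
-- def parse_Uri(lib, array):
--     b = False
--     for a in array:
--         if b:
--             if lib != a:
--                 return a
--         elif lib == a:
--             b = True
-- ===== SOURCE B (Python) =====
-- def parse_Uri(lib, array):
--     # Phase 1: mask[i] says whether lib occurs strictly before index i.
--     mask = []
--     acc = False
--     for a in array:
--         mask.append(acc)
--         acc = acc or a == lib
--     # Phase 2: first element whose mask bit is set and which differs from lib.
--     for a, m in zip(array, mask):
--         if m and a != lib:
--             return a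
--     return None
-- ===== Notes on version B (the rewrite author's own statement) =====
-- stated objective: alternative
-- what changed: Replaces A's single-pass early-return flag automaton with a two-phase pipeline: first build a prefix-occurrence mask (mask[i] = lib seen strictly before index i), then zip-scan array against the mask for the first element with its bit set that differs from lib.
import Mathlib
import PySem

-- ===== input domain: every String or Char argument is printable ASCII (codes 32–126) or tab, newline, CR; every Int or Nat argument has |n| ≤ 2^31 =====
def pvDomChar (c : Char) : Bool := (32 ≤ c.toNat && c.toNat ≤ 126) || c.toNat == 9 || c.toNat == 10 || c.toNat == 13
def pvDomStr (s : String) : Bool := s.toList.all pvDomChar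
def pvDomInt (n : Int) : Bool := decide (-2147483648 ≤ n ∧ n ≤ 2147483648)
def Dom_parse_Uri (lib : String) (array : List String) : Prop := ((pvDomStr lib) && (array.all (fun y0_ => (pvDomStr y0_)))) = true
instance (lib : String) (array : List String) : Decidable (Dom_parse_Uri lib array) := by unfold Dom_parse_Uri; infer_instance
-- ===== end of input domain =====

-- B replaces A's early-return flag automaton with a two-phase pipeline: build a
-- prefix-occurrence mask, then zip-scan array against it; same return values.

-- ===== PORT A =====
-- A's loop with the flag b as explicit state.
def parseA_go (lib : String) : List String → Bool → Option String
  | [], _ => none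
  | a :: rest, b =>
    if b then
      if lib ≠ a then some a else parseA_go lib rest b
    else if lib == a then parseA_go lib rest true
    else parseA_go lib rest false

def parse_Uri (lib : String) (array : List String) : Option String :=
  parseA_go lib array false

-- ===== PORT B =====
-- Phase 1 of B: the mask list, acc carried as the accumulator.
def parseB_mask (lib : String) : List String → Bool → List Bool
  | [], _ => []
  | a :: rest, acc => acc :: parseB_mask lib rest (acc || a == lib)

-- Phase 2 of B: zip-scan for the first pair (a, m) with m set and a ≠ lib.
def parseB_scan (lib : String) : List (String × Bool) → Option String
  | [] => none
  | (a, m) :: rest => if m ∧ a ≠ lib then some a else parseB_scan lib rest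

def parse_Uri_alt (lib : String) (array : List String) : Option String :=
  parseB_scan lib (array.zip (parseB_mask lib array false))

-- ===== PRECONDITION & SPEC =====
def Spec_parse_Uri (lib : String) (array : List String) (out : Option String) : Prop := out = parse_Uri_alt lib array
instance (lib : String) (array : List String) (out : Option String) : Decidable (Spec_parse_Uri lib array out) := by unfold Spec_parse_Uri; infer_instance

-- ===== CLAIM (what is proved, stated in full; the proofs are below) =====
def Claim_equal_parse_Uri : Prop := ∀ (lib : String) (array : List String), Dom_parse_Uri lib array → Spec_parse_Uri lib array (parse_Uri lib array)

-- ===== LEMMAS AND PROOFS =====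

-- Invariant: B's zip-scan of the mask built from accumulator b equals A's loop with flag b.
lemma scan_zip_mask_eq_go (lib : String) (xs : List String) :
    ∀ b : Bool, parseB_scan lib (xs.zip (parseB_mask lib xs b)) = parseA_go lib xs b := by
  induction xs with
  | nil => intro b; rfl
  | cons a rest ih =>
    intro b
    simp only [parseB_mask, List.zip_cons_cons, parseB_scan]
    cases b with
    | true =>
      by_cases h : lib = a
      · subst h; simp [parseA_go, ih]
      · have hne : a ≠ lib := fun e => h e.symm
        simp [parseA_go, h, hne]
    | false =>
      by_cases h : lib = a
      · subst h; simp [parseA_go, ih]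
      · simp [parseA_go, h, ih, show (a == lib) = false from by simpa using fun e => h e.symm]

-- ===== VERDICT (by name: the statement is the Claim_ definition above) =====
theorem parse_Uri_spec : Claim_equal_parse_Uri := by
  intro lib array _
  unfold Spec_parse_Uri parse_Uri parse_Uri_alt
  exact (scan_zip_mask_eq_go lib array false).symm
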